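-- pv_equiv track=rewrite | github.com/NICE-HKU/StarSD | framework/single_inference_engine.py | get_between_tags
-- ===== SOURCE A (Python) =====
-- def get_between_tags(tag_list, new_tag):
--     """
--     Return elements from after the last occurrence of new_tag to the end,
--     then append the last occurrence of new_tag (as a tuple).
--
--     tag_list: List of tuples like [(tag, timestamp), ...]
--     new_tag: The tag to search for (compared against tuple[0])
--     Returns: List of tuples, or None if new_tag not found.
--     """
--     # Find indices where tuple[0] == new_tag
--     matching_indices = [i for i, (tag, _) in enumerate(tag_list) if tag == new_tag]
--
--     if not matching_indices:
--         return None
--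
--     last_index = matching_indices[-1]
--
--     if last_index == len(tag_list) - 1:
--         return [tag_list[last_index]]
--
--     return tag_list[last_index + 1:] + [tag_list[last_index]]
-- ===== SOURCE B (Python) =====
-- def get_between_tags(tag_list, new_tag):
--     # Single forward pass with an accumulator: no index list, no slicing.
--     # On each match, remember the element and restart the tail; otherwise,
--     # once a match has been seen, accumulate the element into the tail.
--     found = None
--     tail = []
--     for item in tag_list:
--         if item[0] == new_tag:
--             found = item
--             tail = []
--         elif found is not None:
--             tail.append(item)
--     if found is None:
--         return None
--     return tail + [found]
-- ===== Notes on version B (the rewrite author's own statement) =====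
-- stated objective: alternative
-- what changed: Replaces A's collect-all-matching-indices pass plus index slicing (and end-of-list special case) by a single forward fold maintaining (last match, tail-so-far) accumulators, using no indices or slices at all.
import Mathlib
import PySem

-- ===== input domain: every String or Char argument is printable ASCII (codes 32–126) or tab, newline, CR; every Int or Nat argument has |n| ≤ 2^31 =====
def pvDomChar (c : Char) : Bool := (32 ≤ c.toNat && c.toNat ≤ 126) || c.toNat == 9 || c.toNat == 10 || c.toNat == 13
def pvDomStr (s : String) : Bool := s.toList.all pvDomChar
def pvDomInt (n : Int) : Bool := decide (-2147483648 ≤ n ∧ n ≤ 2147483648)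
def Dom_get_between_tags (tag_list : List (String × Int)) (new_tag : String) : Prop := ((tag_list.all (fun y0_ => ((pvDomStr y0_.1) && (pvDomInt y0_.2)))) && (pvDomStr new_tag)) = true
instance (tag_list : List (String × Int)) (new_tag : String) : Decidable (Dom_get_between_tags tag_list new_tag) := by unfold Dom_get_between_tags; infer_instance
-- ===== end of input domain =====

-- B replaces A's collect-matching-indices pass plus slicing by a single forward fold
-- keeping (last match, tail-so-far) accumulators; alternative decomposition, same cost.


-- ===== PORT A =====
-- matching_indices = [i for i, (tag, _) in enumerate(tag_list) if tag == new_tag]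
-- then the if/last-index/slice chain, step for step.
def get_between_tags (tag_list : List (String × Int)) (new_tag : String) : Option (List (String × Int)) :=
  let matching_indices :=
    ((PySem.List.enumerate tag_list).filter (fun p => p.2.1 == new_tag)).map (fun p => p.1)
  if matching_indices = [] then none
  else
    let last_index := PySem.List.pyGetD matching_indices (-1) 0
    if last_index = (tag_list.length : Int) - 1 then
      some [PySem.List.pyGetD tag_list last_index ("", 0)]
    else
      some (PySem.List.slice tag_list (some (last_index + 1)) none
              ++ [PySem.List.pyGetD tag_list last_index ("", 0)])

-- ===== PORT B =====
-- the body of B's 'for item in tag_list' loop: state = (found, tail)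
def altStep (new_tag : String)
    (st : Option (String × Int) × List (String × Int)) (item : String × Int) :
    Option (String × Int) × List (String × Int) :=
  if item.1 == new_tag then (some item, [])
  else
    match st.1 with
    | some _ => (st.1, st.2 ++ [item])
    | none => st

def get_between_tags_alt (tag_list : List (String × Int)) (new_tag : String) : Option (List (String × Int)) :=
  let st := tag_list.foldl (altStep new_tag) (none, [])
  match st.1 with
  | none => none
  | some m => some (st.2 ++ [m])

-- ===== PRECONDITION & SPEC =====
def Spec_get_between_tags (tag_list : List (String × Int)) (new_tag : String) (out : Option (List (String × Int))) : Prop := out = get_between_tags_alt tag_list new_tag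
instance (tag_list : List (String × Int)) (new_tag : String) (out : Option (List (String × Int))) : Decidable (Spec_get_between_tags tag_list new_tag out) := by unfold Spec_get_between_tags; infer_instance

-- ===== CLAIM (what is proved, stated in full; the proofs are below) =====
def Claim_equal_get_between_tags : Prop := ∀ (tag_list : List (String × Int)) (new_tag : String), Dom_get_between_tags tag_list new_tag → Spec_get_between_tags tag_list new_tag (get_between_tags tag_list new_tag)

-- ===== LEMMAS AND PROOFS =====

-- reference characterisation: last matching index and element, found from the front
def lastMatch (new_tag : String) : List (String × Int) → Option (Nat × (String × Int))
  | [] => none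
  | x :: rest =>
    match lastMatch new_tag rest with
    | some (n, m) => some (n + 1, m)
    | none => if x.1 == new_tag then some (0, x) else none

theorem lastMatch_idx {new_tag : String} : ∀ {xs : List (String × Int)} {n : Nat} {m : String × Int},
    lastMatch new_tag xs = some (n, m) → n < xs.length ∧ xs[n]? = some m := by
  intro xs
  induction xs with
  | nil => intro n m h; simp [lastMatch] at h
  | cons x rest ih =>
    intro n m h
    simp only [lastMatch] at h
    cases hr : lastMatch new_tag rest with
    | some p =>
      obtain ⟨k, mm⟩ := p
      rw [hr] at h
      obtain ⟨hk, hget⟩ := ih hr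
      simp at h
      obtain ⟨hn, hm⟩ := h
      subst hn hm
      constructor
      · simp; omega
      · simpa using hget
    | none =>
      rw [hr] at h
      by_cases hx : x.1 == new_tag
      · simp [hx] at h; obtain ⟨hn, hm⟩ := h; subst hn hm; simp
      · simp [hx] at h

theorem lastMatch_append (new_tag : String) (x : String × Int) :
    ∀ (ys : List (String × Int)),
    lastMatch new_tag (ys ++ [x])
      = if x.1 == new_tag then some (ys.length, x) else lastMatch new_tag ys := by
  intro ys
  induction ys with
  | nil => by_cases h : x.1 == new_tag <;> simp [lastMatch, h]
  | cons y ys ihy =>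
    simp only [List.cons_append, lastMatch, ihy]
    by_cases h : x.1 == new_tag
    · simp [h]
    · simp [h]

theorem getLast?_mi (new_tag : String) : ∀ (xs : List (String × Int)) (s : Int),
    (((PySem.List.enumerate xs s).filter (fun p => p.2.1 == new_tag)).map (fun p => p.1)).getLast?
      = (lastMatch new_tag xs).map (fun p => (p.1 : Int) + s) := by
  intro xs
  induction xs with
  | nil => intro s; simp [PySem.List.enumerate, lastMatch]
  | cons x rest ih =>
    intro s
    rw [PySem.List.enumerate_cons]
    by_cases hx : x.1 == new_tag
    · have : ((s, x) :: PySem.List.enumerate rest (s+1)).filter (fun p => p.2.1 == new_tag)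
          = (s, x) :: ((PySem.List.enumerate rest (s+1)).filter (fun p => p.2.1 == new_tag)) := by
        simp [hx]
      rw [this, List.map_cons]
      have hcons : (s :: ((PySem.List.enumerate rest (s+1)).filter (fun p => p.2.1 == new_tag)).map (fun p => p.1)).getLast?
          = (((PySem.List.enumerate rest (s+1)).filter (fun p => p.2.1 == new_tag)).map (fun p => p.1)).getLast?.or (some s) := by
        rw [show (s :: ((PySem.List.enumerate rest (s+1)).filter (fun p => p.2.1 == new_tag)).map (fun p => p.1))
              = [s] ++ ((PySem.List.enumerate rest (s+1)).filter (fun p => p.2.1 == new_tag)).map (fun p => p.1) from rfl,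
            List.getLast?_append]
        rfl
      rw [hcons, ih (s+1)]
      cases hr : lastMatch new_tag rest with
      | some p =>
        obtain ⟨k, mm⟩ := p
        simp [lastMatch, hr]; ring
      | none => simp [lastMatch, hr, hx]
    · have : ((s, x) :: PySem.List.enumerate rest (s+1)).filter (fun p => p.2.1 == new_tag)
          = (PySem.List.enumerate rest (s+1)).filter (fun p => p.2.1 == new_tag) := by
        simp [hx]
      rw [this, ih (s+1)]
      cases hr : lastMatch new_tag rest with
      | some p =>
        obtain ⟨k, mm⟩ := p
        simp [lastMatch, hr]; ring
      | none => simp [lastMatch, hr, hx]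

-- A equals the reference characterisation
theorem A_char (xs : List (String × Int)) (new_tag : String) :
    get_between_tags xs new_tag
      = (lastMatch new_tag xs).map (fun p => xs.drop (p.1 + 1) ++ [p.2]) := by
  unfold get_between_tags
  have hmi := getLast?_mi new_tag xs 0
  simp only [add_zero] at hmi
  cases hlm : lastMatch new_tag xs with
  | none =>
    rw [hlm] at hmi
    simp only [Option.map_none] at hmi
    have : (((PySem.List.enumerate xs).filter (fun p => p.2.1 == new_tag)).map (fun p => p.1)) = [] :=
      List.getLast?_eq_none_iff.mp hmi
    simp [this]
  | some p =>
    obtain ⟨n, m⟩ := p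
    rw [hlm] at hmi
    obtain ⟨hn, hget⟩ := lastMatch_idx hlm
    have hne : (((PySem.List.enumerate xs).filter (fun p => p.2.1 == new_tag)).map (fun p => p.1)) ≠ [] := by
      intro h; rw [h] at hmi; simp at hmi
    have hlastD : PySem.List.pyGetD (((PySem.List.enumerate xs).filter (fun p => p.2.1 == new_tag)).map (fun p => p.1)) (-1) 0 = (n : Int) := by
      rw [PySem.List.pyGetD_neg_one _ 0 hne]
      have := List.getLast?_eq_some_getLast hne
      rw [this] at hmi
      simp only [Option.map_some, Option.some_inj] at hmi
      exact hmi
    have hgetm : PySem.List.pyGetD xs (n : Int) ("", 0) = m := by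
      rw [PySem.List.pyGetD_natCast]
      have : xs.getD n ("", 0) = m := by
        rw [List.getD_eq_getElem?_getD, hget]; rfl
      exact this
    simp only [hlastD, hgetm, if_neg hne]
    by_cases hlen : (n : Int) = (xs.length : Int) - 1
    · rw [if_pos hlen]
      have hdrop : xs.drop (n + 1) = [] := by
        apply List.drop_eq_nil_of_le; omega
      simp [hdrop]
    · rw [if_neg hlen]
      have : PySem.List.slice xs (some ((n : Int) + 1)) none = xs.drop (n + 1) := by
        rw [show ((n : Int) + 1) = ((n + 1 : Nat) : Int) by push_cast; ring]
        exact PySem.List.slice_from_natCast xs (n + 1)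
      simp [this]

-- B's forward fold computes (last match, tail after it)
theorem foldl_char (new_tag : String) : ∀ (xs : List (String × Int)),
    xs.foldl (altStep new_tag) (none, [])
      = (match lastMatch new_tag xs with
         | none => (none, [])
         | some (n, m) => (some m, xs.drop (n + 1))) := by
  intro xs
  induction xs using List.reverseRecOn with
  | nil => simp [lastMatch]
  | append_singleton ys x ih =>
    rw [List.foldl_append, List.foldl_cons, List.foldl_nil, ih, lastMatch_append]
    by_cases hx : x.1 == new_tag
    · rw [if_pos hx]
      cases hlm : lastMatch new_tag ys with
      | none => simp [altStep, hx]
      | some p =>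
        obtain ⟨n, m⟩ := p
        simp [altStep, hx]
    · rw [if_neg hx]
      cases hlm : lastMatch new_tag ys with
      | none => simp [altStep, hx]
      | some p =>
        obtain ⟨n, m⟩ := p
        obtain ⟨hn, _⟩ := lastMatch_idx hlm
        have hle : n + 1 ≤ ys.length := by omega
        simp [altStep, hx, List.drop_append_of_le_length hle]

theorem B_char (xs : List (String × Int)) (new_tag : String) :
    get_between_tags_alt xs new_tag
      = (lastMatch new_tag xs).map (fun p => xs.drop (p.1 + 1) ++ [p.2]) := by
  unfold get_between_tags_alt
  rw [foldl_char]
  cases hlm : lastMatch new_tag xs with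
  | none => simp
  | some p => obtain ⟨n, m⟩ := p; simp

-- ===== VERDICT (by name: the statement is the Claim_ definition above) =====
theorem get_between_tags_spec : Claim_equal_get_between_tags := by
  intro tag_list new_tag _
  unfold Spec_get_between_tags
  rw [A_char, B_char]
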